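-- pv_equiv track=rewrite | github.com/lothronx/cm3035-car-api | cars/utils/tag_helpers.py | _get_displacement_category
-- ===== SOURCE A (Python) =====
-- def _get_displacement_category(capacity):
--     """
--     Determines the engine displacement category based on capacity.
--
--     Args:
--         capacity (int): Engine capacity in cc
--
--     Returns:
--         str: Displacement category (SMALL, LOW_MID, MID, LARGE, VERY_LARGE, or EXTREME)
--     """
--     ranges = [
--         (1000, "Small"),
--         (1600, "Low-Mid"),
--         (2500, "Mid"),
--         (4000, "Large"),
--         (6000, "Very Large"),
--         (float("inf"), "Extreme"),
--     ]
--     for limit, category in ranges: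
--         if capacity <= limit:
--             return category
-- ===== SOURCE B (Python) =====
-- def _get_displacement_category(capacity):
--     thresholds = [1000, 1600, 2500, 4000, 6000]
--     labels = ["Small", "Low-Mid", "Mid", "Large", "Very Large", "Extreme"]
--     lo, hi = 0, len(thresholds)
--     while lo < hi:
--         mid = (lo + hi) // 2
--         if thresholds[mid] < capacity:
--             lo = mid + 1
--         else:
--             hi = mid
--     return labels[lo]
-- ===== Notes on version B (the rewrite author's own statement) =====
-- stated objective: alternative
-- what changed: Replaces the sequential scan over (limit, label) pairs with a float('inf') sentinel by a bisect_left-style binary search over a sorted thresholds list indexing a parallel labels list.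
import Mathlib
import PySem

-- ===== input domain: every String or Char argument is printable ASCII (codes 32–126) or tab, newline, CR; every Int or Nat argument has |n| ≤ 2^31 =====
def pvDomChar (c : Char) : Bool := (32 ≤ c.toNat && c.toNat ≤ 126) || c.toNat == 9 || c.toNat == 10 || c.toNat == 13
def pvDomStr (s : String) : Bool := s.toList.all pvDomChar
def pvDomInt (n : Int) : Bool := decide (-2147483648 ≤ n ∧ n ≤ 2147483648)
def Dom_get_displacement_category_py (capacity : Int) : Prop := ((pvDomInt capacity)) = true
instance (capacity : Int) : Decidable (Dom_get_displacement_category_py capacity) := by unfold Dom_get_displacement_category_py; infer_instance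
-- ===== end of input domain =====

-- B replaces A's sequential scan over (limit, label) pairs (with a float('inf') sentinel)
-- by a bisect_left-style binary search over a sorted thresholds list indexing a parallel labels list.

-- ===== PORT A =====
-- A's ranges list; the float('inf') sentinel is `none` (capacity <= inf is always true for an int).
def pvRangesA : List (Option Int × String) :=
  [(some 1000, "Small"), (some 1600, "Low-Mid"), (some 2500, "Mid"),
   (some 4000, "Large"), (some 6000, "Very Large"), (none, "Extreme")]

-- A's for-loop: return the category of the first pair whose limit admits capacity.
def pvScanA (rs : List (Option Int × String)) (capacity : Int) : Option String :=
  match rs with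
  | [] => none
  | (some l, category) :: rest =>
    if capacity ≤ l then some category else pvScanA rest capacity
  | (none, category) :: _ => some category   -- capacity <= float('inf') is always true

-- the `none` fallthrough (Python's implicit None) is unreachable: the inf sentinel always matches.
def get_displacement_category_py (capacity : Int) : String :=
  (pvScanA pvRangesA capacity).getD ""

-- ===== PORT B =====
def pvThresholds : List Int := [1000, 1600, 2500, 4000, 6000]
def pvLabels : List String := ["Small", "Low-Mid", "Mid", "Large", "Very Large", "Extreme"]

-- B's hand-written bisect_left while-loop, transliterated (indices always in range).
def pvBisect (thresholds : List Int) (capacity : Int) (lo hi : Nat) : Nat :=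
  if lo < hi then
    let mid := (lo + hi) / 2
    if thresholds.getD mid 0 < capacity then pvBisect thresholds capacity (mid + 1) hi
    else pvBisect thresholds capacity lo mid
  else lo
termination_by hi - lo
decreasing_by all_goals omega

def get_displacement_category_py_alt (capacity : Int) : String :=
  pvLabels.getD (pvBisect pvThresholds capacity 0 pvThresholds.length) ""

-- ===== PRECONDITION & SPEC =====
def Spec_get_displacement_category_py (capacity : Int) (out : String) : Prop := out = get_displacement_category_py_alt capacity
instance (capacity : Int) (out : String) : Decidable (Spec_get_displacement_category_py capacity out) := by unfold Spec_get_displacement_category_py; infer_instance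

-- ===== CLAIM (what is proved, stated in full; the proofs are below) =====
def Claim_equal_get_displacement_category_py : Prop := ∀ (capacity : Int), Dom_get_displacement_category_py capacity → Spec_get_displacement_category_py capacity (get_displacement_category_py capacity)

-- ===== LEMMAS AND PROOFS =====

-- full evaluation of B's binary search on its fixed five-element thresholds list
lemma pvBisect_eval (x : Int) :
    pvBisect pvThresholds x 0 5 =
      if x ≤ 1000 then 0 else if x ≤ 1600 then 1 else if x ≤ 2500 then 2
      else if x ≤ 4000 then 3 else if x ≤ 6000 then 4 else 5 := by
  by_cases h1 : x ≤ 1000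
  · rw [pvBisect]; simp [pvThresholds, show ¬((2500:Int) < x) by omega]
    rw [pvBisect]; simp [show ¬((1600:Int) < x) by omega]
    rw [pvBisect]; simp [show ¬((1000:Int) < x) by omega]
    rw [pvBisect]; simp [h1]
  · by_cases h2 : x ≤ 1600
    · rw [pvBisect]; simp [pvThresholds, show ¬((2500:Int) < x) by omega]
      rw [pvBisect]; simp [show ¬((1600:Int) < x) by omega]
      rw [pvBisect]; simp [show (1000:Int) < x by omega]
      rw [pvBisect]; simp [h1, h2]
    · by_cases h3 : x ≤ 2500
      · rw [pvBisect]; simp [pvThresholds, show ¬((2500:Int) < x) by omega]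
        rw [pvBisect]; simp [show (1600:Int) < x by omega]
        rw [pvBisect]; simp [h1, h2, h3]
      · by_cases h4 : x ≤ 4000
        · rw [pvBisect]; simp [pvThresholds, show (2500:Int) < x by omega]
          rw [pvBisect]; simp [show ¬((6000:Int) < x) by omega]
          rw [pvBisect]; simp [show ¬((4000:Int) < x) by omega]
          rw [pvBisect]; simp [h1, h2, h3, h4]
        · by_cases h5 : x ≤ 6000
          · rw [pvBisect]; simp [pvThresholds, show (2500:Int) < x by omega]
            rw [pvBisect]; simp [show ¬((6000:Int) < x) by omega]
            rw [pvBisect]; simp [show (4000:Int) < x by omega]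
            rw [pvBisect]; simp [h1, h2, h3, h4, h5]
          · rw [pvBisect]; simp [pvThresholds, show (2500:Int) < x by omega]
            rw [pvBisect]; simp [show (6000:Int) < x by omega]
            rw [pvBisect]; simp [h1, h2, h3, h4, h5]

-- ===== VERDICT (by name: the statement is the Claim_ definition above) =====
theorem get_displacement_category_py_spec : Claim_equal_get_displacement_category_py := by
  intro capacity _
  unfold Spec_get_displacement_category_py get_displacement_category_py get_displacement_category_py_alt
  rw [show pvThresholds.length = 5 from rfl, pvBisect_eval]
  by_cases h1 : capacity ≤ 1000 <;> by_cases h2 : capacity ≤ 1600 <;>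
    by_cases h3 : capacity ≤ 2500 <;> by_cases h4 : capacity ≤ 4000 <;>
    by_cases h5 : capacity ≤ 6000 <;>
    simp [pvScanA, pvRangesA, pvLabels, h1, h2, h3, h4, h5]
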